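/- CARRIED OVER by tools/port_base_units.py (renaming only) from proofs.vorbis/Vorbis/Spec/Units, GENERATED there by farm/mkstatement.py from design/units.tsv (unit `__asan_load4_noabort`) and the Specs of Vorbis/Spec/*.lean — do not edit.
   THE STATEMENT of the proof unit `__asan_load4_noabort`: the function `__asan_load4_noabort` (22 instructions) satisfies its contract,
   given the contracts of its callees. What the names mean: Vorbis/Spec/Basic.lean. The theorem to prove:
   `theorem asan_load4_noabort_ok : ProgX.Base.Spec.asan_load4_noabort.Statement`. -/
import ProgX.Base.Spec.Runtime
namespace ProgX.Base.Spec.asan_load4_noabort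
open X86 X86.User Asan

/-- The statement of unit `__asan_load4_noabort`. -/
def Statement : Prop :=
  ∀ (Lay : Layout) (_hLay : Lay.hi = 0x1000000) (μ : Microarch) (_hμ : UserX.MicroOK μ) (u₀ : State)
    (_hcode : HasCodeNat Lay u₀ ProgX.Base.L.__asan_load4_noabort.entry ProgX.Base.Code.code___asan_load4_noabort.nat ProgX.Base.L.__asan_load4_noabort.size),
    Asan.SmallCheck Lay μ ProgX.Base.WayInv (ProgX.Base.CodeOK u₀) [.rax, .rcx, .rdx] 4 ProgX.Base.L.__asan_load4_noabort.entry

end ProgX.Base.Spec.asan_load4_noabort
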